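-- pv_equiv track=rewrite | github.com/agus341/Paradigms_of_programming | Montos.py | sucursal_masventas
-- ===== SOURCE A (Python) =====
-- def sucursal_masventas(matriz):
--     ventas = []
--     # n itera las sucursales
--     for n in range(2):
--         cont = 0
--         # m recorre los años para cada sucursal
--         for m in range(2):
--             cont += matriz[n][m]
--         # El índice de ventas se corresponde con el número de sucursal (su correspondiente venta)
--         ventas.append(cont)
--
--     max_ventas = max(ventas)
--
--     for i in range(2):
--         if ventas[i] == max_ventas:
--             return i
-- ===== SOURCE B (Python) =====
-- def sucursal_masventas(matriz):
--     # Loop-free: branch 1 wins only if its total strictly exceeds branch 0's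
--     # (strict '>' keeps A's first-wins tie behaviour); the boolean IS the index.
--     return int(matriz[1][0] + matriz[1][1] > matriz[0][0] + matriz[0][1])
-- ===== Notes on version B (the rewrite author's own statement) =====
-- stated objective: simpler
-- what changed: Eliminates all loops and the ventas list/max/rescan machinery: since there are exactly two branches, the answer is the boolean 'branch 1 strictly beats branch 0' cast to int, one comparison of the two totals.
import Mathlib
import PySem

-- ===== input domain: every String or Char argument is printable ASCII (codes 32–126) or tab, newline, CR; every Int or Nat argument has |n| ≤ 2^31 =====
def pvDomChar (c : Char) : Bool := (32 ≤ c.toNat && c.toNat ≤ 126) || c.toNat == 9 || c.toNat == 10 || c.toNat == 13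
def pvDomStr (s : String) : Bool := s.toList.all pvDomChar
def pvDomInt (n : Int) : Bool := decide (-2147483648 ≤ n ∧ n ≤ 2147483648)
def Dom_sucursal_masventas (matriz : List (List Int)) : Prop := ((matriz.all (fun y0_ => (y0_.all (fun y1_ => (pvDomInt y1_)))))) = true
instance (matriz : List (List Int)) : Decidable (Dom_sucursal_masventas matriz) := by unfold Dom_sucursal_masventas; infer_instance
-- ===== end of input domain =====

-- B drops A's ventas list / max / rescan entirely: with two branches the answer is the boolean comparison of the two totals cast to int.


-- ===== PORT A =====
-- literal port of A: build ventas by two nested range(2) loops, take max, rescan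
-- for the first index whose entry equals the max (Python's trailing 'return None'
-- is unreachable under Pre_; the .getD 0 fallbacks are taken only outside Pre_).
def sucursal_masventas (matriz : List (List Int)) : Int :=
  let ventas : List Int :=
    (PySem.List.pyRange 0 2 1).foldl (fun acc n =>
      let cont :=
        (PySem.List.pyRange 0 2 1).foldl (fun c m =>
          c + (PySem.List.pyGet? ((PySem.List.pyGet? matriz n).getD []) m).getD 0) 0
      acc ++ [cont]) []
  let max_ventas := (PySem.List.max? ventas (fun x => x)).getD 0
  ((PySem.List.pyRange 0 2 1).findSome? (fun i =>
      if (PySem.List.pyGet? ventas i).getD 0 = max_ventas then some i else none)).getD 0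

-- ===== PORT B =====
-- port of B: int(matriz[1][0] + matriz[1][1] > matriz[0][0] + matriz[0][1])
def sucursal_masventas_alt (matriz : List (List Int)) : Int :=
  let row0 := (PySem.List.pyGet? matriz 0).getD []
  let row1 := (PySem.List.pyGet? matriz 1).getD []
  if (PySem.List.pyGet? row1 0).getD 0 + (PySem.List.pyGet? row1 1).getD 0 >
     (PySem.List.pyGet? row0 0).getD 0 + (PySem.List.pyGet? row0 1).getD 0
  then 1 else 0

-- ===== PRECONDITION & SPEC =====
-- Pre_ excludes exactly the inputs on which A raises IndexError: fewer than 2 rows,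
-- or one of the first two rows having fewer than 2 entries.
def Pre_sucursal_masventas (matriz : List (List Int)) : Prop :=
  2 ≤ matriz.length ∧ ∀ r ∈ matriz.take 2, 2 ≤ r.length
instance (matriz : List (List Int)) : Decidable (Pre_sucursal_masventas matriz) := by
  unfold Pre_sucursal_masventas; infer_instance
def pvWitness_sucursal_masventas : List (List Int) := [[1, 2], [3, 4]]

def Spec_sucursal_masventas (matriz : List (List Int)) (out : Int) : Prop := out = sucursal_masventas_alt matriz
instance (matriz : List (List Int)) (out : Int) : Decidable (Spec_sucursal_masventas matriz out) := by unfold Spec_sucursal_masventas; infer_instance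

-- ===== CLAIM (what is proved, stated in full; the proofs are below) =====
def Claim_equal_sucursal_masventas : Prop := ∀ (matriz : List (List Int)), Dom_sucursal_masventas matriz → Pre_sucursal_masventas matriz → Spec_sucursal_masventas matriz (sucursal_masventas matriz)

-- ===== LEMMAS AND PROOFS =====

-- ===== VERDICT (by name: the statement is the Claim_ definition above) =====
set_option maxHeartbeats 1000000 in
theorem sucursal_masventas_spec : Claim_equal_sucursal_masventas := by
  intro matriz _ hpre
  obtain ⟨hlen, hrows⟩ := hpre
  match matriz, hlen with
  | r0 :: r1 :: rest, _ =>
    have h0 : 2 ≤ r0.length := hrows r0 (by simp)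
    have h1 : 2 ≤ r1.length := hrows r1 (by simp)
    match r0, h0, r1, h1 with
    | a :: b :: t0, _, c :: d :: t1, _ =>
      show _ = _
      have hr : PySem.List.pyRange 0 2 1 = [0, 1] := by decide
      have e0 : (0:Int) ≤ (rest.length:Int) + 1 := by omega
      have e1 : (1:Int) ≤ (rest.length:Int) + 1 := by omega
      have f0 : (0:Int) < (t0.length:Int) + 2 := by omega
      have f1 : (1:Int) < (t0.length:Int) + 2 := by omega
      have g0 : (0:Int) < (t1.length:Int) + 2 := by omega
      have g1 : (1:Int) < (t1.length:Int) + 2 := by omega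
      simp only [sucursal_masventas, sucursal_masventas_alt, hr]
      norm_num [PySem.List.pyGet?, PySem.List.pyIdx?, PySem.List.max?,
        List.foldl, List.findSome?, List.getElem?_cons_zero, List.getElem?_cons_succ,
        Option.bind_some, e0, e1, f0, f1, g0, g1]
      split_ifs <;> simp_all
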